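-- pv_equiv track=rewrite | github.com/VitorLima1990/PRTL-mHEM | System.py | CurveAbove
-- ===== SOURCE A (Python) =====
-- def CurveAbove(VInsulator, V0):
--     startIndex = 0
--     endIndex = 0
--
--     index = 0
--     while(index < len(VInsulator)):
--         if(VInsulator[index] >= V0):
--             startIndex = index
--             break
--         index += 1
--
--     if(startIndex == 0):
--         return None
--     else:
--         #Looks for the end
--         index = startIndex
--         while(index < len(VInsulator)):
--             if(VInsulator[index] >= V0):
--                 endIndex = index
--             index += 1
--
--     return VInsulator[startIndex: (endIndex + 1)]
-- ===== SOURCE B (Python) =====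
-- def CurveAbove(VInsulator, V0):
--     first = None
--     last = 0
--     for i, v in enumerate(VInsulator):
--         if v >= V0:
--             if first is None:
--                 first = i
--             last = i
--     if first is None or first == 0:
--         return None
--     return VInsulator[first:last + 1]
-- ===== Notes on version B (the rewrite author's own statement) =====
-- stated objective: simpler
-- what changed: Replaces A's two separate forward scans (break-on-first-match, then a second rescan from that index for the last match) with one single pass over enumerate that captures both the first and last matching indices.
import Mathlib
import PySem

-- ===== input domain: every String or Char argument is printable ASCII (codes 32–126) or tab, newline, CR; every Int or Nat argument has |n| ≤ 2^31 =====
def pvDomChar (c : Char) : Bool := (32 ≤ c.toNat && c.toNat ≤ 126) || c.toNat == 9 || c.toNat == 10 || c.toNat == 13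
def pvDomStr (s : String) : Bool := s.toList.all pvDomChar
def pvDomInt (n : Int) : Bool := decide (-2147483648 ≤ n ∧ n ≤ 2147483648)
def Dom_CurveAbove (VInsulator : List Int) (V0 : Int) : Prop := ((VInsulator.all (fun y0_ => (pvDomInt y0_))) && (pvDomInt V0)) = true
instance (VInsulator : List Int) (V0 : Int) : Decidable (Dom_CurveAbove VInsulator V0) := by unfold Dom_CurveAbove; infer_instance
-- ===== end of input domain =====

-- B replaces A's two forward scans (find first match, rescan for last) with one pass capturing both endpoints.

-- ===== PORT A =====
-- first while loop: advance index, break (returning index) on the first element ≥ V0; startIndex stays 0 if no break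
def aFirst (VInsulator : List Int) (V0 : Int) (index : Nat) : Nat :=
  if h : index < VInsulator.length then
    if V0 ≤ VInsulator[index] then index
    else aFirst VInsulator V0 (index + 1)
  else 0
termination_by VInsulator.length - index
decreasing_by omega

-- second while loop: endIndex updated at every element ≥ V0
def aLast (VInsulator : List Int) (V0 : Int) (index : Nat) (endIndex : Nat) : Nat :=
  if h : index < VInsulator.length then
    aLast VInsulator V0 (index + 1) (if V0 ≤ VInsulator[index] then index else endIndex)
  else endIndex
termination_by VInsulator.length - index
decreasing_by omega

def CurveAbove (VInsulator : List Int) (V0 : Int) : Option (List Int) :=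
  let startIndex := aFirst VInsulator V0 0
  if startIndex = 0 then none
  else
    let endIndex := aLast VInsulator V0 startIndex 0
    some (PySem.List.slice VInsulator (some (startIndex : Int)) (some ((endIndex : Int) + 1)))

-- ===== PORT B =====
-- the single for-loop over enumerate(VInsulator): first set once, last on every match
def bScan (V0 : Int) (pairs : List (Int × Int)) (first : Option Int) (last : Int) :
    Option Int × Int :=
  match pairs with
  | [] => (first, last)
  | (i, v) :: rest =>
    if V0 ≤ v then
      bScan V0 rest (match first with | none => some i | some f => some f) i
    else
      bScan V0 rest first last

def CurveAbove_alt (VInsulator : List Int) (V0 : Int) : Option (List Int) :=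
  let fl := bScan V0 (PySem.List.enumerate VInsulator 0) none 0
  match fl.1 with
  | none => none
  | some f =>
    if f = 0 then none
    else some (PySem.List.slice VInsulator (some f) (some (fl.2 + 1)))

-- ===== PRECONDITION & SPEC =====
def Spec_CurveAbove (VInsulator : List Int) (V0 : Int) (out : Option (List Int)) : Prop := out = CurveAbove_alt VInsulator V0
instance (VInsulator : List Int) (V0 : Int) (out : Option (List Int)) : Decidable (Spec_CurveAbove VInsulator V0 out) := by unfold Spec_CurveAbove; infer_instance

-- ===== CLAIM (what is proved, stated in full; the proofs are below) =====
def Claim_equal_CurveAbove : Prop := ∀ (VInsulator : List Int) (V0 : Int), Dom_CurveAbove VInsulator V0 → Spec_CurveAbove VInsulator V0 (CurveAbove VInsulator V0)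

-- ===== LEMMAS AND PROOFS =====

-- reference notions used only by the proofs: index of the first / last element ≥ V0
def firstMatch (V0 : Int) : List Int → Option Nat
  | [] => none
  | x :: t => if V0 ≤ x then some 0 else (firstMatch V0 t).map (· + 1)

def lastMatch (V0 : Int) : List Int → Option Nat
  | [] => none
  | x :: t =>
    match lastMatch V0 t with
    | some k => some (k + 1)
    | none => if V0 ≤ x then some 0 else none

theorem aFirst_eq (VInsulator : List Int) (V0 : Int) (index : Nat) :
    aFirst VInsulator V0 index =
      match firstMatch V0 (VInsulator.drop index) with
      | some k => index + k
      | none => 0 := by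
  by_cases h : index < VInsulator.length
  · rw [List.drop_eq_getElem_cons h, aFirst, dif_pos h]
    by_cases hm : V0 ≤ VInsulator[index]
    · simp [firstMatch, hm]
    · rw [if_neg hm, aFirst_eq VInsulator V0 (index + 1)]
      cases hfm : firstMatch V0 (VInsulator.drop (index + 1)) with
      | none => simp [firstMatch, hm, hfm]
      | some k => simp only [firstMatch, hm, hfm, if_false, Option.map_some]; ring
  · rw [aFirst, dif_neg h, List.drop_of_length_le (by omega)]
    simp [firstMatch]
termination_by VInsulator.length - index
decreasing_by omega

theorem aLast_eq (VInsulator : List Int) (V0 : Int) (index : Nat) (endIndex : Nat) :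
    aLast VInsulator V0 index endIndex =
      match lastMatch V0 (VInsulator.drop index) with
      | some k => index + k
      | none => endIndex := by
  by_cases h : index < VInsulator.length
  · rw [List.drop_eq_getElem_cons h, aLast, dif_pos h, aLast_eq VInsulator V0 (index + 1)]
    cases hlm : lastMatch V0 (VInsulator.drop (index + 1)) with
    | none => by_cases hm : V0 ≤ VInsulator[index] <;> simp [lastMatch, hlm, hm]
    | some k => simp only [lastMatch, hlm]; ring
  · rw [aLast, dif_neg h, List.drop_of_length_le (by omega)]
    simp [lastMatch]
termination_by VInsulator.length - index
decreasing_by omega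

theorem bScan_eq (V0 : Int) (xs : List Int) (s : Int) (first : Option Int) (last : Int) :
    bScan V0 (PySem.List.enumerate xs s) first last =
      (first.or ((firstMatch V0 xs).map (fun j => s + (j : Int))),
       match lastMatch V0 xs with
       | some k => s + (k : Int)
       | none => last) := by
  induction xs generalizing s first last with
  | nil => simp [PySem.List.enumerate_nil, bScan, firstMatch, lastMatch]
  | cons x t ih =>
    rw [PySem.List.enumerate_cons]
    simp only [bScan]
    by_cases hm : V0 ≤ x
    · rw [if_pos hm, ih]
      simp only [firstMatch, lastMatch, if_pos hm, Prod.mk.injEq]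
      constructor
      · cases first <;> simp
      · cases hlm : lastMatch V0 t <;> simp [hlm] <;> ring
    · rw [if_neg hm, ih]
      simp only [firstMatch, lastMatch, if_neg hm, Prod.mk.injEq]
      constructor
      · cases hfm : firstMatch V0 t <;> cases first <;> simp [hfm] <;> ring
      · cases hlm : lastMatch V0 t <;> simp [hlm] <;> ring

-- if the first match is at j, the last match is j + (last match of the suffix from j)
theorem lastMatch_of_firstMatch (V0 : Int) (xs : List Int) (j : Nat)
    (h : firstMatch V0 xs = some j) :
    ∃ k, lastMatch V0 (xs.drop j) = some k ∧ lastMatch V0 xs = some (j + k) := by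
  induction xs generalizing j with
  | nil => simp [firstMatch] at h
  | cons x t ih =>
    by_cases hm : V0 ≤ x
    · simp [firstMatch, hm] at h
      subst h
      simp only [List.drop_zero]
      cases hlm : lastMatch V0 t with
      | none => exact ⟨0, by simp [lastMatch, hlm, hm]⟩
      | some k => exact ⟨k + 1, by simp [lastMatch, hlm]⟩
    · simp [firstMatch, hm] at h
      obtain ⟨j', hj', rfl⟩ := h
      obtain ⟨k, hk1, hk2⟩ := ih j' hj'
      exact ⟨k, by simpa using hk1, by simp [lastMatch, hk2]; omega⟩

-- ===== VERDICT (by name: the statement is the Claim_ definition above) =====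
theorem CurveAbove_spec : Claim_equal_CurveAbove := by
  intro VInsulator V0 _
  unfold Spec_CurveAbove CurveAbove CurveAbove_alt
  rw [bScan_eq, aFirst_eq]
  simp only [List.drop_zero, Option.or, Option.map]
  cases hfm : firstMatch V0 VInsulator with
  | none => simp
  | some j =>
    obtain ⟨k, hk1, hk2⟩ := lastMatch_of_firstMatch V0 VInsulator j hfm
    by_cases hj : j = 0
    · subst hj; simp [hk2]
    · have hj' : (j : Int) ≠ 0 := by exact_mod_cast hj
      simp [aLast_eq, hk1, hk2, hj, hj']
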